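-- pv_equiv track=rewrite | github.com/jbrry/coding-practice | codility/count_character_substrings.py | solution
-- ===== SOURCE A (Python) =====
-- def solution(S):
--     count = 0
--     end = len(S)-1
--     for i in range(len(S)):
--         r = i
--         # while r is in-bound and characters are the same.
--         while r <= end and S[i] == S[r]:
--             count += 1
--             # scan right
--             r += 1
--     return count
-- ===== SOURCE B (Python) =====
-- def solution(S):
--     total = 0
--     run = 0
--     prev = None
--     for ch in S:
--         run = run + 1 if prev == ch else 1
--         prev = ch
--         total += run
--     return total
-- ===== Notes on version B (the rewrite author's own statement) =====
-- stated objective: faster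
-- what changed: Replaced the per-index rightward rescans (a while loop restarted at every i) by a single left-to-right pass maintaining the current run length and adding it at each position, so each run of length L contributes 1+2+...+L without rescanning.
import Mathlib
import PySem

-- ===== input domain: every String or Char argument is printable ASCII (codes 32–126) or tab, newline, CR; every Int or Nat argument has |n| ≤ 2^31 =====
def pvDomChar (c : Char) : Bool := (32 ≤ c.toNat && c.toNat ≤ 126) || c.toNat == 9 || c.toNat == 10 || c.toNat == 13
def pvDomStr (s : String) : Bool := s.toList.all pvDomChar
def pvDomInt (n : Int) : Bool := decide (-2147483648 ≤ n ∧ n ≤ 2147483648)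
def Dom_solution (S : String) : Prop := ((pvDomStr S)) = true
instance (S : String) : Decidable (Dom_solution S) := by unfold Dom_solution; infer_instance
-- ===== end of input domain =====

-- B is a single left-to-right pass keeping the current run length; A rescans rightwards from every index (asymptotically faster B).

-- ===== PORT A =====
-- the inner 'while r <= end and S[i] == S[r]: count += 1; r += 1' loop
def solWhile (l : List Char) (c : Char) (endI : Int) (r : Int) (count : Int) : Int :=
  if h : r ≤ endI ∧ PySem.List.pyGet? l r = some c then
    solWhile l c endI (r + 1) (count + 1)
  else
    count
termination_by (endI + 1 - r).toNat
decreasing_by omega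

def solution (S : String) : Int :=
  let l := S.toList
  let endI : Int := (l.length : Int) - 1
  (List.range l.length).foldl (fun count i => solWhile l (l.getD i ' ') endI (i : Int) count) 0

-- ===== PORT B =====
-- state (total, run, prev); per char: run = run+1 if prev == ch else 1
def solution_alt (S : String) : Int :=
  (S.toList.foldl
    (fun (st : Int × Int × Option Char) ch =>
      let run := if st.2.2 = some ch then st.2.1 + 1 else 1
      (st.1 + run, run, some ch))
    (0, 0, none)).1

-- ===== PRECONDITION & SPEC =====
def Spec_solution (S : String) (out : Int) : Prop := out = solution_alt S
instance (S : String) (out : Int) : Decidable (Spec_solution S out) := by unfold Spec_solution; infer_instance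

-- ===== CLAIM (what is proved, stated in full; the proofs are below) =====
def Claim_equal_solution : Prop := ∀ (S : String), Dom_solution S → Spec_solution S (solution S)

-- ===== LEMMAS AND PROOFS =====

-- sum over all suffixes of the length of the initial constant run
def runSum : List Char → Int
  | [] => 0
  | c :: t => (1 + ((t.takeWhile (fun x => x = c)).length : Int)) + runSum t

-- B-side: what the fold contributes after a given state
def G : List Char → Int → Option Char → Int
  | [], _, _ => 0
  | ch :: t, run, prev =>
      let r := if prev = some ch then run + 1 else 1
      r + G t r (some ch)

theorem Bfold_eq (l : List Char) (total run : Int) (prev : Option Char) :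
    (l.foldl
      (fun (st : Int × Int × Option Char) ch =>
        let r := if st.2.2 = some ch then st.2.1 + 1 else 1
        (st.1 + r, r, some ch))
      (total, run, prev)).1 = total + G l run prev := by
  induction l generalizing total run prev with
  | nil => simp [G]
  | cons ch t ih =>
      simp only [List.foldl_cons, G]
      rw [ih]
      ring

theorem G_shift (l : List Char) (c : Char) (a : Int) :
    G l a (some c) = G l 0 (some c) + a * ((l.takeWhile (fun x => x = c)).length : Int) := by
  induction l generalizing a with
  | nil => simp [G]
  | cons ch t ih =>
      by_cases hc : ch = c
      · subst hc
        simp [G]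
        rw [ih (a + 1), ih 1]
        ring
      · simp [G, hc, Ne.symm hc]

theorem G_zero_prev (l : List Char) (p q : Option Char) :
    G l 0 p = G l 0 q := by
  cases l with
  | nil => simp [G]
  | cons ch t =>
      simp only [G]
      have : ∀ r : Option Char, (if r = some ch then (0 : Int) + 1 else 1) = 1 := by
        intro r; split <;> simp
      rw [this p, this q]

theorem G_eq_runSum (l : List Char) : G l 0 none = runSum l := by
  induction l with
  | nil => simp [G, runSum]
  | cons c t ih =>
      simp only [G, runSum]
      rw [if_neg (by simp)]
      rw [G_shift t c 1, G_zero_prev t (some c) none, ih]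
      ring

-- A-side: the while loop counts the initial constant run of the suffix
theorem solWhile_eq (l : List Char) (c : Char) :
    ∀ r : Nat, ∀ count : Int,
      solWhile l c ((l.length : Int) - 1) (r : Int) count
        = count + (((l.drop r).takeWhile (fun x => x = c)).length : Int) := by
  intro r
  induction hn : l.length - r using Nat.strong_induction_on generalizing r with
  | _ n ih =>
    intro count
    rw [solWhile]
    by_cases hr : r < l.length
    · have hget : PySem.List.pyGet? l (r : Int) = l[r]? := by
        simp [PySem.List.pyGet?_natCast]
      have hdrop : l.drop r = l[r] :: l.drop (r + 1) := List.drop_eq_getElem_cons hr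
      by_cases hc : l[r] = c
      · rw [dif_pos ⟨by omega, by rw [hget]; simp [hr, hc]⟩]
        have hcast : ((r : Int) + 1) = ((r + 1 : Nat) : Int) := by push_cast; ring
        rw [hcast, ih (l.length - (r + 1)) (by omega) (r + 1) rfl]
        rw [hdrop]
        simp [hc]
        ring
      · rw [dif_neg]
        · rw [hdrop]
          simp [hc]
        · rintro ⟨-, hg⟩
          rw [hget] at hg
          simp [hr] at hg
          exact hc hg
    · rw [dif_neg (by omega)]
      rw [List.drop_eq_nil_of_le (by omega)]
      simp

theorem sum_eq_runSum (l : List Char) :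
    ((List.range l.length).map
        (fun i => (((l.drop i).takeWhile (fun x => x = l.getD i ' ')).length : Int))).sum
      = runSum l := by
  induction l with
  | nil => simp [runSum]
  | cons c t ih =>
      rw [show (c :: t).length = t.length + 1 from rfl, List.range_succ_eq_map]
      simp only [List.map_cons, List.map_map, List.sum_cons]
      have h0 : ((((c :: t).drop 0).takeWhile (fun x => x = (c :: t).getD 0 ' ')).length : Int)
          = (((c :: t).takeWhile (fun x => x = c)).length : Int) := by simp
      have hm : (List.range t.length).map
            ((fun i => ((((c :: t).drop i).takeWhile (fun x => x = (c :: t).getD i ' ')).length : Int)) ∘ (· + 1))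
          = (List.range t.length).map
            (fun i => (((t.drop i).takeWhile (fun x => x = t.getD i ' ')).length : Int)) := by
        apply List.map_congr_left
        intro i _
        simp [Function.comp]
      rw [h0, hm, ih]
      simp [runSum]
      ring

theorem foldA_eq (l : List Char) :
    (List.range l.length).foldl
        (fun count i => solWhile l (l.getD i ' ') ((l.length : Int) - 1) (i : Int) count) 0
      = runSum l := by
  have key : ∀ (L : List Nat) (init : Int) (f : Nat → Int),
      L.foldl (fun count i => count + f i) init = init + (L.map f).sum := by
    intro L
    induction L with
    | nil => simp
    | cons x t ih => intro init f; simp [List.foldl_cons, ih]; ring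
  have hfun : (fun (count : Int) (i : Nat) =>
        solWhile l (l.getD i ' ') ((l.length : Int) - 1) (i : Int) count)
      = fun count i => count + (((l.drop i).takeWhile (fun x => x = l.getD i ' ')).length : Int) := by
    funext count i
    exact solWhile_eq l (l.getD i ' ') i count
  rw [hfun, key, sum_eq_runSum]
  ring

-- ===== VERDICT (by name: the statement is the Claim_ definition above) =====
theorem solution_spec : Claim_equal_solution := by
  intro S _
  unfold Spec_solution solution solution_alt
  rw [Bfold_eq, foldA_eq, G_eq_runSum]
  simp
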